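-- pv_equiv track=rewrite | github.com/fredpottier/KBGPT | src/knowbase/stratified/pass1/verbatim_validator.py | find_normalized_position
-- ===== SOURCE A (Python) =====
-- from typing import Dict, List, Optional, Tuple
--
-- def normalize_whitespace(text: str) -> str:
--     """Normalise les espaces et retours ligne."""
--     # Remplacer tous les whitespaces consécutifs par un seul espace
--     return " ".join(text.split())
--
-- def find_normalized_position(needle: str, haystack: str) -> Optional[Tuple[int, int]]:
--     """
--     Trouve la position après normalisation whitespace.
--
--     Complexe car on doit mapper les positions normalisées vers les originales.
--     """
--     norm_needle = normalize_whitespace(needle)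
--     norm_haystack = normalize_whitespace(haystack)
--
--     pos = norm_haystack.find(norm_needle)
--     if pos < 0:
--         return None
--
--     # Mapper la position normalisée vers l'originale
--     # On parcourt haystack en comptant les caractères non-whitespace
--     char_count = 0
--     start_pos = None
--     end_pos = None
--
--     in_whitespace = False
--     normalized_idx = 0
--
--     for i, char in enumerate(haystack):
--         if char.isspace():
--             if not in_whitespace:
--                 in_whitespace = True
--                 if normalized_idx > 0:
--                     normalized_idx += 1  # Compte l'espace normalisé
--         else:
--             in_whitespace = False
--             if start_pos is None and normalized_idx >= pos:
--                 start_pos = i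
--             normalized_idx += 1
--             if start_pos is not None and normalized_idx >= pos + len(norm_needle):
--                 end_pos = i + 1
--                 break
--
--     if start_pos is not None and end_pos is not None:
--         return (start_pos, end_pos)
--
--     return None
-- ===== SOURCE B (Python) =====
-- def find_normalized_position(needle, haystack):
--     norm_needle = " ".join(needle.split())
--     # tokenize haystack into (original_start, token) pairs by isspace scan
--     tokens = []
--     i = 0
--     n = len(haystack)
--     while i < n:
--         if haystack[i].isspace():
--             i += 1
--         else:
--             j = i
--             while j < n and not haystack[j].isspace():
--                 j += 1
--             tokens.append((i, haystack[i:j]))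
--             i = j
--     norm_haystack = " ".join(t for _, t in tokens)
--     pos = norm_haystack.find(norm_needle)
--     if pos < 0:
--         return None
--
--     def orig(target):
--         off = 0
--         for s, t in tokens:
--             if target < off + len(t):
--                 return s + (target - off)
--             off += len(t) + 1
--         return None
--
--     start = orig(pos)
--     last = pos + (len(norm_needle) - 1 if norm_needle else 0)
--     end = orig(last)
--     if start is None or end is None:
--         return None
--     return (start, end + 1)
-- ===== Notes on version B (the rewrite author's own statement) =====
-- stated objective: alternative
-- what changed: B tokenizes the haystack once into (original_start, token) pairs, builds the normalized string by joining the tokens, and maps the normalized match positions back to original indices by arithmetic over cumulative token offsets, replacing A's stateful character scan with in_whitespace/normalized_idx/start_pos bookkeeping.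
import Mathlib
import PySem

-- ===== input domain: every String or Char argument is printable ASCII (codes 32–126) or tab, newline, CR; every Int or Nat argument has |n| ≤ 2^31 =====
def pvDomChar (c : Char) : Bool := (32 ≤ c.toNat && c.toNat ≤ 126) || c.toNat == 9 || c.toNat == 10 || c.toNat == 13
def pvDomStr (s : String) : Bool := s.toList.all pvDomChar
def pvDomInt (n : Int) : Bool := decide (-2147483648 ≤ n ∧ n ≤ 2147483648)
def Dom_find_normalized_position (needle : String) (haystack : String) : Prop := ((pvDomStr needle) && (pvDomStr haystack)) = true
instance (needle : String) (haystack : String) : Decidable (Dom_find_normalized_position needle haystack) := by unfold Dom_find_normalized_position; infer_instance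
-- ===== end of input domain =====

-- B re-implements A by tokenizing the haystack once into (start, token) pairs and mapping
-- normalized positions back through cumulative token offsets (objective: alternative decomposition).

-- ===== PORT A =====
-- the main for-loop of A (char_count is dead in A and omitted; break returns `some`, falling off = `none`)
def loopA (pos L : Int) : List (Int × Char) → Bool → Int → Option Int → Option (Int × Int)
  | [], _, _, _ => none
  | (i, c) :: rest, inws, nidx, sp =>
    if PySem.Chars.isspace c then
      if !inws then
        loopA pos L rest true (if nidx > 0 then nidx + 1 else nidx) sp
      else
        loopA pos L rest true nidx sp
    else
      let sp' : Option Int := match sp with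
        | none => if nidx ≥ pos then some i else none
        | some s => some s
      match sp' with
      | some s => if nidx + 1 ≥ pos + L then some (s, i + 1) else loopA pos L rest false (nidx + 1) (some s)
      | none => loopA pos L rest false (nidx + 1) none

def find_normalized_position (needle : String) (haystack : String) : Option (Int × Int) :=
  let norm_needle := PySem.Chars.join [' '] (PySem.Chars.split₀ needle.toList)
  let norm_haystack := PySem.Chars.join [' '] (PySem.Chars.split₀ haystack.toList)
  let pos := PySem.Chars.find norm_haystack norm_needle
  if pos < 0 then none
  else loopA pos (norm_needle.length : Int) (PySem.List.enumerate haystack.toList 0) false 0 none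

-- ===== PORT B =====
-- tokenize haystack into (original_start_index, token) pairs (Source B's while-loop with isspace scan)
def tokenizeB : List Char → Int → List (Int × List Char)
  | [], _ => []
  | c :: rest, i =>
    if PySem.Chars.isspace c then tokenizeB rest (i + 1)
    else
      let tok := c :: rest.takeWhile (fun ch => !PySem.Chars.isspace ch)
      (i, tok) :: tokenizeB (rest.dropWhile (fun ch => !PySem.Chars.isspace ch)) (i + (tok.length : Int))
  termination_by cs => cs.length
  decreasing_by
    all_goals have := List.length_dropWhile_le (fun ch => !PySem.Chars.isspace ch) rest
    all_goals simp
    all_goals omega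

-- Source B's orig(target): walk the tokens with a running normalized offset
def origB : List (Int × List Char) → Int → Int → Option Int
  | [], _, _ => none
  | (s, t) :: ts, off, target =>
    if target < off + (t.length : Int) then some (s + (target - off))
    else origB ts (off + (t.length : Int) + 1) target

def find_normalized_position_alt (needle : String) (haystack : String) : Option (Int × Int) :=
  let norm_needle := PySem.Chars.join [' '] (PySem.Chars.split₀ needle.toList)
  let tokens := tokenizeB haystack.toList 0
  let norm_haystack := PySem.Chars.join [' '] (tokens.map (·.2))
  let pos := PySem.Chars.find norm_haystack norm_needle
  if pos < 0 then none
  else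
    let last := pos + (if norm_needle ≠ [] then (norm_needle.length : Int) - 1 else 0)
    match origB tokens 0 pos, origB tokens 0 last with
    | some s, some e => some (s, e + 1)
    | _, _ => none

-- ===== PRECONDITION & SPEC =====
def Spec_find_normalized_position (needle : String) (haystack : String) (out : Option (Int × Int)) : Prop := out = find_normalized_position_alt needle haystack
instance (needle : String) (haystack : String) (out : Option (Int × Int)) : Decidable (Spec_find_normalized_position needle haystack out) := by unfold Spec_find_normalized_position; infer_instance

-- ===== CLAIM (what is proved, stated in full; the proofs are below) =====
def Claim_equal_find_normalized_position : Prop := ∀ (needle : String) (haystack : String), Dom_find_normalized_position needle haystack → Spec_find_normalized_position needle haystack (find_normalized_position needle haystack)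


-- ===== LEMMAS AND PROOFS =====

-- proof-side notions: token positions and the normalized end bound of a token list
def isTok : List (Int × List Char) → Int → Int → Prop
  | [], _, _ => False
  | (_, t) :: ts, off, p => (off ≤ p ∧ p < off + (t.length : Int)) ∨ isTok ts (off + (t.length : Int) + 1) p

def nEnd : List (Int × List Char) → Int → Int
  | [], off => off
  | (_, t) :: ts, off => nEnd ts (off + (t.length : Int) + 1)

def GoodP (ts : List (Int × List Char)) (off p : Int) : Prop := isTok ts off p ∨ nEnd ts off ≤ p

def TokWF (ts : List (Int × List Char)) : Prop :=
  ∀ q ∈ ts, q.2 ≠ [] ∧ ∀ c ∈ q.2, PySem.Chars.isspace c = false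

def headSp : List Char → Prop
  | [] => True
  | c :: _ => PySem.Chars.isspace c = true

def InvA (cs : List Char) (inws : Bool) (nidx off : Int) : Prop :=
  (inws = true ∧ nidx = off) ∨ (inws = false ∧ nidx = 0 ∧ off = 0) ∨
  (inws = false ∧ nidx + 1 = off ∧ 0 < nidx ∧ headSp cs)

theorem isTok_le {p : Int} : ∀ (ts : List (Int × List Char)) (off : Int), isTok ts off p → off ≤ p := by
  intro ts
  induction ts with
  | nil => intro off h; exact absurd h (by simp [isTok])
  | cons q ts ih =>
    obtain ⟨s, t⟩ := q
    intro off h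
    rcases h with ⟨h1, _⟩ | h2
    · exact h1
    · have := ih _ h2; omega

theorem le_nEnd : ∀ (ts : List (Int × List Char)) (off : Int), off ≤ nEnd ts off := by
  intro ts
  induction ts with
  | nil => intro off; simp [nEnd]
  | cons q ts ih =>
    obtain ⟨s, t⟩ := q
    intro off
    have := ih (off + (t.length : Int) + 1)
    simp only [nEnd]; omega

theorem goodP_tail {s : Int} {t : List Char} {ts : List (Int × List Char)} {off p : Int}
    (h : GoodP ((s, t) :: ts) off p) (hp : off + (t.length : Int) ≤ p) :
    GoodP ts (off + (t.length : Int) + 1) p ∧ off + (t.length : Int) + 1 ≤ p := by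
  rcases h with (⟨_, h2⟩ | h3) | h4
  · omega
  · exact ⟨Or.inl h3, isTok_le _ _ h3⟩
  · simp only [nEnd] at h4
    exact ⟨Or.inr h4, le_trans (le_nEnd _ _) h4⟩

theorem tokenizeB_wf : ∀ (cs : List Char) (i : Int), TokWF (tokenizeB cs i) := by
  intro cs i
  induction cs, i using tokenizeB.induct with
  | case1 i => intro q hq; simp [tokenizeB] at hq
  | case2 c rest i hsp ih =>
    intro q hq
    rw [tokenizeB, if_pos hsp] at hq
    exact ih q hq
  | case3 c rest i hsp tok ih =>
    intro q hq
    rw [tokenizeB, if_neg hsp] at hq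
    simp only [List.mem_cons] at hq
    rcases hq with rfl | hq
    · refine ⟨by simp, ?_⟩
      intro d hd
      simp only [List.mem_cons] at hd
      rcases hd with rfl | hd
      · simpa using hsp
      · have := List.mem_takeWhile_imp hd
        simpa using this
    · exact ih q hq

theorem headSp_dropWhile (rest : List Char) :
    headSp (rest.dropWhile (fun ch => !PySem.Chars.isspace ch)) := by
  cases h : rest.dropWhile (fun ch => !PySem.Chars.isspace ch) with
  | nil => simp [headSp]
  | cons c cs =>
    have h2 : rest.dropWhile (fun ch => !PySem.Chars.isspace ch) ≠ [] := by simp [h]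
    have := List.head_dropWhile_not (fun ch => !PySem.Chars.isspace ch) (l := rest) h2
    simp only [h, List.head_cons] at this
    simpa [headSp] using this

theorem run2 (pos L pend : Int) (hpend : pend = pos + L - 1) :
    ∀ (tw : List Char) (E : List (Int × Char)) (i nidx s : Int) (inws : Bool),
    (∀ c ∈ tw, PySem.Chars.isspace c = false) → nidx ≤ pend →
    loopA pos L (PySem.List.enumerate tw i ++ E) inws nidx (some s) =
      if pend < nidx + (tw.length : Int) then some (s, i + (pend - nidx) + 1)
      else loopA pos L E (if tw.isEmpty then inws else false) (nidx + (tw.length : Int)) (some s) := by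
  intro tw
  induction tw with
  | nil =>
    intro E i nidx s inws _ hle
    simp only [PySem.List.enumerate_nil, List.nil_append, List.length_nil, Int.natCast_zero,
      List.isEmpty_nil, if_true]
    rw [if_neg (by omega)]
    simp
  | cons c tw ih =>
    intro E i nidx s inws hns hle
    rw [PySem.List.enumerate_cons, List.cons_append]
    have hc : PySem.Chars.isspace c = false := hns c (List.mem_cons_self)
    rw [loopA, if_neg (by simp [hc])]
    simp only [List.length_cons, List.isEmpty_cons, Nat.cast_add, Nat.cast_one, Bool.false_eq_true,
      if_false]
    by_cases hend : nidx + 1 ≥ pos + L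
    · rw [if_pos hend, if_pos (by omega)]
      have : pend = nidx := by omega
      subst this; ring_nf
    · rw [if_neg hend]
      have e1 : nidx + ((tw.length : Int) + 1) = nidx + 1 + (tw.length : Int) := by ring
      rw [e1]
      rw [ih E (i + 1) (nidx + 1) s false (fun d hd => hns d (List.mem_cons_of_mem _ hd)) (by omega)]
      have e2 : (i + 1) + (pend - (nidx + 1)) + 1 = i + (pend - nidx) + 1 := by ring
      rw [e2, ite_self]

theorem run1 (pos L pend : Int) (hpend : pend = max pos (pos + L - 1)) :
    ∀ (tw : List Char) (E : List (Int × Char)) (i nidx : Int) (inws : Bool),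
    (∀ c ∈ tw, PySem.Chars.isspace c = false) → nidx ≤ pos →
    loopA pos L (PySem.List.enumerate tw i ++ E) inws nidx none =
      if pos < nidx + (tw.length : Int) then
        (if pend < nidx + (tw.length : Int) then some (i + (pos - nidx), i + (pend - nidx) + 1)
         else loopA pos L E false (nidx + (tw.length : Int)) (some (i + (pos - nidx))))
      else loopA pos L E (if tw.isEmpty then inws else false) (nidx + (tw.length : Int)) none := by
  intro tw
  induction tw with
  | nil =>
    intro E i nidx inws _ hle
    simp only [PySem.List.enumerate_nil, List.nil_append, List.length_nil, Int.natCast_zero,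
      List.isEmpty_nil, if_true]
    rw [if_neg (by omega)]
    simp
  | cons c tw ih =>
    intro E i nidx inws hns hle
    rw [PySem.List.enumerate_cons, List.cons_append]
    have hc : PySem.Chars.isspace c = false := hns c (List.mem_cons_self)
    rw [loopA, if_neg (by simp [hc])]
    simp only [List.length_cons, List.isEmpty_cons, Nat.cast_add, Nat.cast_one, Bool.false_eq_true,
      if_false]
    have e1 : nidx + ((tw.length : Int) + 1) = nidx + 1 + (tw.length : Int) := by ring
    rw [e1]
    have hple : pos ≤ pend := by rw [hpend]; exact le_max_left _ _
    by_cases hhit : nidx ≥ pos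
    · have hnp : nidx = pos := by omega
      rw [if_pos hhit]
      simp only []
      by_cases hend : nidx + 1 ≥ pos + L
      · have hpe : pend = pos := by rw [hpend]; exact max_eq_left (by omega)
        rw [if_pos hend, if_pos (by omega), if_pos (by omega), hnp, hpe]
        simp
      · have hpe : pend = pos + L - 1 := by rw [hpend]; exact max_eq_right (by omega)
        rw [if_neg hend]
        rw [run2 pos L pend hpe tw E (i + 1) (nidx + 1) i false
            (fun d hd => hns d (List.mem_cons_of_mem _ hd)) (by omega)]
        rw [if_pos (show pos < nidx + 1 + (tw.length : Int) by omega)]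
        have e2 : (i + 1) + (pend - (nidx + 1)) + 1 = i + (pend - nidx) + 1 := by ring
        have e3 : i + (pos - nidx) = i := by omega
        rw [e2, e3, ite_self]
    · rw [if_neg hhit]
      rw [ih E (i + 1) (nidx + 1) false (fun d hd => hns d (List.mem_cons_of_mem _ hd)) (by omega)]
      have e2 : (i + 1) + (pos - (nidx + 1)) = i + (pos - nidx) := by ring
      have e4 : (i + 1) + (pend - (nidx + 1)) + 1 = i + (pend - nidx) + 1 := by ring
      rw [e2, e4, ite_self]

theorem main2 (pos L pend : Int) (hpend : pend = pos + L - 1) :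
    ∀ (cs : List Char) (i : Int), ∀ (off nidx s : Int) (inws : Bool),
    InvA cs inws nidx off → 0 ≤ off → off ≤ pend → GoodP (tokenizeB cs i) off pend →
    loopA pos L (PySem.List.enumerate cs i) inws nidx (some s) =
      (match origB (tokenizeB cs i) off pend with
       | some e => some (s, e + 1) | none => none) := by
  intro cs i
  induction cs, i using tokenizeB.induct with
  | case1 i =>
    intro off nidx s inws _ _ _ _
    simp [tokenizeB, origB, PySem.List.enumerate_nil, loopA]
  | case2 c rest i hsp ih =>
    intro off nidx s inws hinv hoff hle hgood
    rw [tokenizeB, if_pos hsp] at hgood ⊢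
    rw [PySem.List.enumerate_cons, loopA, if_pos hsp]
    cases hin : inws with
    | true =>
      have hnidx : nidx = off := by
        rcases hinv with ⟨h1, h2⟩ | ⟨h1, h2, h3⟩ | ⟨h1, h2, h3, _⟩
        · exact h2
        · simp [hin] at h1
        · simp [hin] at h1
      simp only [Bool.not_true, Bool.false_eq_true, if_false]
      rw [ih off nidx s true (Or.inl ⟨rfl, hnidx⟩) hoff hle hgood]
    | false =>
      have hnidx : (if nidx > 0 then nidx + 1 else nidx) = off := by
        rcases hinv with ⟨h1, h2⟩ | ⟨h1, h2, h3⟩ | ⟨h1, h2, h3, _⟩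
        · simp [hin] at h1
        · rw [if_neg (by omega)]; omega
        · rw [if_pos h3]; omega
      simp only [Bool.not_false, if_true]
      rw [ih off _ s true (Or.inl ⟨rfl, hnidx⟩) hoff hle hgood]
  | case3 c rest i hsp tok ih =>
    intro off nidx s inws hinv hoff hle hgood
    have hc : PySem.Chars.isspace c = false := by simpa using hsp
    have hnidx : nidx = off := by
      rcases hinv with ⟨_, h2⟩ | ⟨_, h2, h3⟩ | ⟨_, _, _, h4⟩
      · exact h2
      · omega
      · simp [headSp, hc] at h4
    subst hnidx
    rw [tokenizeB, if_neg hsp] at hgood ⊢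
    simp only [] at hgood ⊢
    have hsplit : (c :: rest) = (c :: rest.takeWhile (fun ch => !PySem.Chars.isspace ch)) ++
        rest.dropWhile (fun ch => !PySem.Chars.isspace ch) := by
      simp [List.takeWhile_append_dropWhile]
    rw [hsplit, PySem.List.enumerate_append]
    have hns : ∀ d ∈ (c :: rest.takeWhile (fun ch => !PySem.Chars.isspace ch)),
        PySem.Chars.isspace d = false := by
      intro d hd
      rcases List.mem_cons.mp hd with rfl | hd
      · exact hc
      · have := List.mem_takeWhile_imp hd; simpa using this
    rw [run2 pos L pend hpend _ _ i nidx s inws hns hle]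
    set tw := rest.takeWhile (fun ch => !PySem.Chars.isspace ch) with htw
    set rest' := rest.dropWhile (fun ch => !PySem.Chars.isspace ch) with hrest'
    have hlen : ((c :: tw).length : Int) = (tw.length : Int) + 1 := by simp
    by_cases hin : pend < nidx + ((c :: tw).length : Int)
    · rw [if_pos hin, origB, if_pos (by omega)]
    · rw [if_neg hin]
      rw [origB, if_neg hin]
      have hgood2 := goodP_tail (s := i) (t := c :: tw) hgood (by omega)
      simp only [List.isEmpty_cons, Bool.false_eq_true, if_false]
      exact ih (nidx + ((c :: tw).length : Int) + 1) (nidx + ((c :: tw).length : Int)) s false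
          (Or.inr (Or.inr ⟨rfl, rfl, by omega, headSp_dropWhile rest⟩))
          (by omega) (by omega) hgood2.1

theorem main1 (pos L pend : Int) (hpend : pend = max pos (pos + L - 1)) :
    ∀ (cs : List Char) (i : Int), ∀ (off nidx : Int) (inws : Bool),
    InvA cs inws nidx off → 0 ≤ off → off ≤ pos →
    GoodP (tokenizeB cs i) off pos → GoodP (tokenizeB cs i) off pend →
    loopA pos L (PySem.List.enumerate cs i) inws nidx none =
      (match origB (tokenizeB cs i) off pos, origB (tokenizeB cs i) off pend with
       | some s, some e => some (s, e + 1)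
       | _, _ => none) := by
  intro cs i
  induction cs, i using tokenizeB.induct with
  | case1 i =>
    intro off nidx inws _ _ _ _ _
    simp [tokenizeB, origB, PySem.List.enumerate_nil, loopA]
  | case2 c rest i hsp ih =>
    intro off nidx inws hinv hoff hle hg1 hg2
    rw [tokenizeB, if_pos hsp] at hg1 hg2 ⊢
    rw [PySem.List.enumerate_cons, loopA, if_pos hsp]
    cases hin : inws with
    | true =>
      have hnidx : nidx = off := by
        rcases hinv with ⟨h1, h2⟩ | ⟨h1, h2, h3⟩ | ⟨h1, h2, h3, _⟩
        · exact h2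
        · simp [hin] at h1
        · simp [hin] at h1
      simp only [Bool.not_true, Bool.false_eq_true, if_false]
      rw [ih off nidx true (Or.inl ⟨rfl, hnidx⟩) hoff hle hg1 hg2]
    | false =>
      have hnidx : (if nidx > 0 then nidx + 1 else nidx) = off := by
        rcases hinv with ⟨h1, h2⟩ | ⟨h1, h2, h3⟩ | ⟨h1, h2, h3, _⟩
        · simp [hin] at h1
        · rw [if_neg (by omega)]; omega
        · rw [if_pos h3]; omega
      simp only [Bool.not_false, if_true]
      rw [ih off _ true (Or.inl ⟨rfl, hnidx⟩) hoff hle hg1 hg2]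
  | case3 c rest i hsp tok ih =>
    intro off nidx inws hinv hoff hle hg1 hg2
    have hc : PySem.Chars.isspace c = false := by simpa using hsp
    have hnidx : nidx = off := by
      rcases hinv with ⟨_, h2⟩ | ⟨_, h2, h3⟩ | ⟨_, _, _, h4⟩
      · exact h2
      · omega
      · simp [headSp, hc] at h4
    subst hnidx
    rw [tokenizeB, if_neg hsp] at hg1 hg2 ⊢
    simp only [] at hg1 hg2 ⊢
    have hsplit : (c :: rest) = (c :: rest.takeWhile (fun ch => !PySem.Chars.isspace ch)) ++
        rest.dropWhile (fun ch => !PySem.Chars.isspace ch) := by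
      simp [List.takeWhile_append_dropWhile]
    rw [hsplit, PySem.List.enumerate_append]
    have hns : ∀ d ∈ (c :: rest.takeWhile (fun ch => !PySem.Chars.isspace ch)),
        PySem.Chars.isspace d = false := by
      intro d hd
      rcases List.mem_cons.mp hd with rfl | hd
      · exact hc
      · have := List.mem_takeWhile_imp hd; simpa using this
    rw [run1 pos L pend hpend _ _ i nidx inws hns hle]
    set tw := rest.takeWhile (fun ch => !PySem.Chars.isspace ch) with htw
    set rest' := rest.dropWhile (fun ch => !PySem.Chars.isspace ch) with hrest'
    have hlen : ((c :: tw).length : Int) = (tw.length : Int) + 1 := by simp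
    have hple : pos ≤ pend := by rw [hpend]; exact le_max_left _ _
    by_cases h1 : pos < nidx + ((c :: tw).length : Int)
    · rw [if_pos h1]
      by_cases h2 : pend < nidx + ((c :: tw).length : Int)
      · rw [if_pos h2, origB, if_pos h1, origB, if_pos h2]
      · have hpe : pend = pos + L - 1 := by rw [hpend]; exact max_eq_right (by omega)
        rw [if_neg h2, origB, if_pos h1, origB, if_neg h2]
        have hg2' := goodP_tail (s := i) (t := c :: tw) hg2 (by omega)
        rw [main2 pos L pend hpe rest' (i + ((c :: tw).length : Int))
            (nidx + ((c :: tw).length : Int) + 1) (nidx + ((c :: tw).length : Int))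
            (i + (pos - nidx)) false
            (Or.inr (Or.inr ⟨rfl, rfl, by omega, headSp_dropWhile rest⟩))
            (by omega) (by omega) hg2'.1]
        cases origB (tokenizeB rest' (i + ((c :: tw).length : Int)))
            (nidx + ((c :: tw).length : Int) + 1) pend <;> simp
    · rw [if_neg h1, origB, if_neg h1, origB,
        if_neg (show ¬pend < nidx + ((c :: tw).length : Int) by omega)]
      have hg1' := goodP_tail (s := i) (t := c :: tw) hg1 (by omega)
      have hg2' := goodP_tail (s := i) (t := c :: tw) hg2 (by omega)
      simp only [List.isEmpty_cons, Bool.false_eq_true, if_false]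
      exact ih (nidx + ((c :: tw).length : Int) + 1) (nidx + ((c :: tw).length : Int)) false
          (Or.inr (Or.inr ⟨rfl, rfl, by omega, headSp_dropWhile rest⟩))
          (by omega) (by omega) hg1'.1 hg2'.1

theorem go_run : ∀ (cs cur : List Char) (acc : List (List Char)), cur ≠ [] →
    PySem.Chars.split₀.go cs cur acc =
      PySem.Chars.split₀.go (cs.dropWhile (fun ch => !PySem.Chars.isspace ch)) []
        ((cur.reverse ++ cs.takeWhile (fun ch => !PySem.Chars.isspace ch)) :: acc) := by
  intro cs
  induction cs with
  | nil =>
    intro cur acc hcur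
    simp [PySem.Chars.split₀.go, hcur]
  | cons c rest ih =>
    intro cur acc hcur
    by_cases hc : PySem.Chars.isspace c = true
    · simp only [PySem.Chars.split₀.go, if_pos, List.takeWhile_cons, List.dropWhile_cons,
        Bool.not_true, Bool.false_eq_true, if_false, hc]
      simp [hcur]
    · have hc' : PySem.Chars.isspace c = false := by simpa using hc
      simp only [PySem.Chars.split₀.go, hc', List.takeWhile_cons, List.dropWhile_cons,
        Bool.not_false, if_true, Bool.false_eq_true, if_false]
      rw [ih (c :: cur) acc (by simp)]
      simp

theorem tokenizeB_map_snd : ∀ (cs : List Char) (i j : Int),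
    (tokenizeB cs i).map (·.2) = (tokenizeB cs j).map (·.2) := by
  intro cs i
  induction cs, i using tokenizeB.induct with
  | case1 i => intro j; simp [tokenizeB]
  | case2 c rest i hsp ih =>
    intro j
    rw [tokenizeB, if_pos hsp, tokenizeB, if_pos hsp]
    exact ih (j + 1)
  | case3 c rest i hsp tok ih =>
    intro j
    rw [tokenizeB, if_neg hsp, tokenizeB, if_neg hsp]
    simp only [List.map_cons]
    congr 1
    exact ih _

theorem go_tok : ∀ (cs : List Char) (i : Int) (acc : List (List Char)),
    PySem.Chars.split₀.go cs [] acc = acc.reverse ++ (tokenizeB cs i).map (·.2) := by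
  intro cs i
  induction cs, i using tokenizeB.induct with
  | case1 i => intro acc; simp [PySem.Chars.split₀.go, tokenizeB]
  | case2 c rest i hsp ih =>
    intro acc
    rw [tokenizeB, if_pos hsp]
    simp only [PySem.Chars.split₀.go, hsp, if_pos, List.isEmpty_nil]
    exact ih acc
  | case3 c rest i hsp tok ih =>
    intro acc
    have hc' : PySem.Chars.isspace c = false := by simpa using hsp
    rw [tokenizeB, if_neg hsp]
    simp only [PySem.Chars.split₀.go, hc', Bool.false_eq_true, if_false]
    rw [go_run rest [c] acc (by simp), List.reverse_singleton, List.singleton_append,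
      ih ((c :: rest.takeWhile (fun ch => !PySem.Chars.isspace ch)) :: acc)]
    simp only [List.reverse_cons, List.append_assoc, List.singleton_append, List.map_cons]
    rw [tokenizeB_map_snd (List.dropWhile (fun ch => !PySem.Chars.isspace ch) rest)
      (i + ((tok.length : Nat) : Int))
      (i + (((c :: rest.takeWhile (fun ch => !PySem.Chars.isspace ch)).length : Nat) : Int))]

theorem split₀_eq (cs : List Char) (i : Int) :
    PySem.Chars.split₀ cs = (tokenizeB cs i).map (·.2) := by
  have := go_tok cs i []
  simpa [PySem.Chars.split₀] using this

theorem join_cons (sep t : List Char) (ts : List (List Char)) :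
    PySem.Chars.join sep (t :: ts) = t ++ (if ts = [] then [] else sep ++ PySem.Chars.join sep ts) := by
  cases ts with
  | nil => simp [PySem.Chars.join, List.intercalate]
  | cons u us => simp [PySem.Chars.join, List.intercalate, List.intersperse]

theorem jn_get_isTok : ∀ (ts : List (Int × List Char)) (off : Int) (j : Nat) (c : Char), TokWF ts →
    (PySem.Chars.join [' '] (ts.map (·.2)))[j]? = some c →
    PySem.Chars.isspace c = false →
    isTok ts off (off + (j : Int)) := by
  intro ts
  induction ts with
  | nil => intro off j c _ hc; simp [PySem.Chars.join, List.intercalate] at hc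
  | cons q ts ih =>
    obtain ⟨s, t⟩ := q
    intro off j c hwf hc hns
    simp only [List.map_cons, join_cons] at hc
    by_cases hlt : j < t.length
    · rw [isTok]
      left
      exact ⟨by omega, by omega⟩
    · by_cases hne : ts = []
      · exfalso
        rw [if_pos (by simp [hne]), List.append_nil, List.getElem?_eq_none_iff.mpr (by omega)] at hc
        simp at hc
      · rw [if_neg (by simpa using hne), List.singleton_append,
          List.getElem?_append_right (by omega)] at hc
        have hj2 : t.length < j := by
          rcases Nat.lt_or_ge t.length j with h | h
          · exact h
          · have hjt : j - t.length = 0 := by omega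
            rw [hjt, List.getElem?_cons_zero] at hc
            obtain rfl : c = ' ' := by simpa using hc.symm
            simp [PySem.Chars.isspace] at hns
        have h3 : j - t.length = (j - t.length - 1) + 1 := by omega
        rw [h3, List.getElem?_cons_succ] at hc
        have hrec := ih (off + (t.length : Int) + 1) (j - t.length - 1) c
          (fun q hq => hwf q (List.mem_cons_of_mem _ hq)) hc hns
        rw [isTok]
        right
        have heq : off + (t.length : Int) + 1 + ((j - t.length - 1 : Nat) : Int) = off + (j : Int) := by
          omega
        rwa [heq] at hrec

theorem jn_ne_nil : ∀ (ts : List (Int × List Char)), TokWF ts → ts ≠ [] →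
    PySem.Chars.join [' '] (ts.map (·.2)) ≠ [] := by
  intro ts hwf hne
  cases ts with
  | nil => simp at hne
  | cons q ts =>
    obtain ⟨s, t⟩ := q
    have ht : t ≠ [] := (hwf (s, t) List.mem_cons_self).1
    simp only [List.map_cons, join_cons]
    simp [ht]

theorem jn_first : ∀ (ts : List (Int × List Char)) (c : Char), TokWF ts →
    (PySem.Chars.join [' '] (ts.map (·.2)))[0]? = some c →
    PySem.Chars.isspace c = false := by
  intro ts c hwf hc
  cases ts with
  | nil => simp [PySem.Chars.join, List.intercalate] at hc
  | cons q ts =>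
    obtain ⟨s, t⟩ := q
    have ht : 0 < t.length := by
      have := (hwf (s, t) List.mem_cons_self).1
      cases t with
      | nil => simp at this
      | cons a b => simp
    simp only [List.map_cons, join_cons] at hc
    rw [List.getElem?_append_left ht] at hc
    have : c ∈ t := List.mem_of_getElem? hc
    exact (hwf (s, t) List.mem_cons_self).2 _ this

theorem jn_last : ∀ (ts : List (Int × List Char)), TokWF ts → ∀ (j : Nat) (c : Char),
    j + 1 = (PySem.Chars.join [' '] (ts.map (·.2))).length →
    (PySem.Chars.join [' '] (ts.map (·.2)))[j]? = some c →
    PySem.Chars.isspace c = false := by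
  intro ts
  induction ts with
  | nil => intro _ j c hj; simp [PySem.Chars.join, List.intercalate] at hj
  | cons q ts ih =>
    obtain ⟨s, t⟩ := q
    intro hwf j c hlast hc
    simp only [List.map_cons, join_cons] at hlast hc
    by_cases hne : ts = []
    · rw [if_pos (by simp [hne]), List.append_nil] at hc
      have : c ∈ t := List.mem_of_getElem? hc
      exact (hwf (s, t) List.mem_cons_self).2 _ this
    · rw [if_neg (by simpa using hne), List.singleton_append] at hlast hc
      have hjn : PySem.Chars.join [' '] (ts.map (·.2)) ≠ [] :=
        jn_ne_nil ts (fun q hq => hwf q (List.mem_cons_of_mem _ hq)) hne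
      have hlen : 0 < (PySem.Chars.join [' '] (ts.map (·.2))).length :=
        List.length_pos_iff.mpr hjn
      simp only [List.length_append, List.length_cons] at hlast
      have hj2 : t.length < j := by omega
      rw [List.getElem?_append_right (by omega)] at hc
      have h3 : j - t.length = (j - t.length - 1) + 1 := by omega
      rw [h3, List.getElem?_cons_succ] at hc
      exact ih (fun q hq => hwf q (List.mem_cons_of_mem _ hq)) (j - t.length - 1) c (by omega) hc

theorem AB_eq (needle haystack : String) :
    find_normalized_position needle haystack = find_normalized_position_alt needle haystack := by
  simp only [find_normalized_position, find_normalized_position_alt]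
  rw [split₀_eq haystack.toList 0]
  set nn := PySem.Chars.join [' '] (PySem.Chars.split₀ needle.toList) with hnndef
  set toks := tokenizeB haystack.toList 0 with htoksdef
  set nh := PySem.Chars.join [' '] (toks.map (·.2)) with hnhdef
  set pos := PySem.Chars.find nh nn with hposdef
  by_cases hpos : pos < 0
  · rw [if_pos hpos, if_pos hpos]
  · rw [if_neg hpos, if_neg hpos]
    have h0 : 0 ≤ pos := by omega
    have hL : 0 ≤ (nn.length : Int) := by positivity
    have hwf : TokWF toks := tokenizeB_wf haystack.toList 0
    have hnwf : TokWF (tokenizeB needle.toList 0) := tokenizeB_wf needle.toList 0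
    have hnn2 : nn = PySem.Chars.join [' ']
        ((tokenizeB needle.toList 0).map (·.2)) := by
      rw [hnndef, split₀_eq needle.toList 0]
    have hlast : pos + (if nn ≠ [] then (nn.length : Int) - 1 else 0) =
        max pos (pos + (nn.length : Int) - 1) := by
      by_cases h : nn = []
      · simp [h]
      · rw [if_pos h]
        have h1 : (1 : Int) ≤ (nn.length : Int) := by
          have := List.length_pos_iff.mpr h; omega
        rw [max_eq_right (show pos ≤ pos + (nn.length : Int) - 1 by omega)]
        ring
    rw [hlast]
    -- Good facts about pos and pend
    have hgoods : GoodP toks 0 pos ∧ GoodP toks 0 (max pos (pos + (nn.length : Int) - 1)) := by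
      by_cases hnn : nn = []
      · have hp0 : pos = 0 := by rw [hposdef, hnn, PySem.Chars.find_nil]
        have hmax : max pos (pos + (nn.length : Int) - 1) = pos := by
          rw [hnn]; simp
        rw [hmax, hp0]
        cases htoks : toks with
        | nil => refine ⟨Or.inr ?_, Or.inr ?_⟩ <;> simp [nEnd]
        | cons q ts =>
          have htoksne : toks ≠ [] := by simp [htoks]
          have hnhne : nh ≠ [] := jn_ne_nil toks hwf htoksne
          have hnhlen : 0 < nh.length := List.length_pos_iff.mpr hnhne
          have hc : nh[0]? = some (nh[0]'hnhlen) := List.getElem?_eq_getElem hnhlen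
          have hns := jn_first toks _ hwf hc
          have := jn_get_isTok toks 0 0 _ hwf hc hns
          simp only [Nat.cast_zero, add_zero] at this
          rw [← htoks]
          exact ⟨Or.inl this, Or.inl this⟩
      · have hL1 : 1 ≤ (nn.length : Int) := by
          have := List.length_pos_iff.mpr hnn; omega
        have hspec := PySem.Chars.find_spec (s := nh) (sub := nn) h0
        obtain ⟨tail, htail⟩ := hspec.1
        have hdl : pos ≤ (nh.length : Int) := PySem.Chars.find_le_length nh nn
        have hdroplen : (nh.drop pos.toNat).length = nn.length + tail.length := by
          rw [← htail, List.length_append]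
        have hdl2 : pos.toNat + nn.length ≤ nh.length := by
          rw [List.length_drop] at hdroplen
          omega
        have hget : ∀ (j : Nat) (hj : j < nn.length), nh[pos.toNat + j]? = some (nn[j]'hj) := by
          intro j hj
          have h1 : (nh.drop pos.toNat)[j]? = nn[j]? := by
            rw [← htail, List.getElem?_append_left hj]
          rw [List.getElem?_drop] at h1
          rw [h1, List.getElem?_eq_getElem hj]
        -- start position
        have hg1 : GoodP toks 0 pos := by
          have hc := hget 0 (by omega)
          have hc0 : nn[0]? = some (nn[0]'(by omega)) := List.getElem?_eq_getElem (by omega)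
          have hns : PySem.Chars.isspace (nn[0]'(by omega)) = false := by
            apply jn_first (tokenizeB needle.toList 0) _ hnwf
            rw [← hnn2]
            exact hc0
          have hit := jn_get_isTok toks 0 (pos.toNat + 0) _ hwf hc hns
          have heq : (0 : Int) + ((pos.toNat + 0 : Nat) : Int) = pos := by push_cast; omega
          rw [heq] at hit
          exact Or.inl hit
        have hg2 : GoodP toks 0 (max pos (pos + (nn.length : Int) - 1)) := by
          have hj2 : nn.length - 1 < nn.length := by omega
          have hc := hget (nn.length - 1) hj2
          have hc0 : nn[nn.length - 1]? = some (nn[nn.length - 1]'hj2) :=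
            List.getElem?_eq_getElem hj2
          have hns : PySem.Chars.isspace (nn[nn.length - 1]'hj2) = false :=
            jn_last (tokenizeB needle.toList 0) hnwf (nn.length - 1) (nn[nn.length - 1]'hj2)
              (by rw [← hnn2]; omega) (by rw [← hnn2]; exact hc0)
          have hit := jn_get_isTok toks 0 (pos.toNat + (nn.length - 1)) _ hwf hc hns
          have heq : (0 : Int) + ((pos.toNat + (nn.length - 1) : Nat) : Int) =
              max pos (pos + (nn.length : Int) - 1) := by
            rw [max_eq_right (by omega)]
            push_cast; omega
          rw [heq] at hit
          exact Or.inl hit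
        exact ⟨hg1, hg2⟩
    exact main1 pos (nn.length : Int) _ rfl haystack.toList 0 0 0 false
      (Or.inr (Or.inl ⟨rfl, rfl, rfl⟩)) (le_refl 0) h0 hgoods.1 hgoods.2

-- ===== VERDICT (by name: the statement is the Claim_ definition above) =====
theorem find_normalized_position_spec : Claim_equal_find_normalized_position := by
  intro needle haystack _
  exact AB_eq needle haystack
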